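-- pv_equiv track=rewrite | github.com/sonic-net/sonic-mgmt | spytest/utilities/utils.py | compare_lists_by_count
-- ===== SOURCE A (Python) =====
-- def compare_lists_by_count(list_to_be_compared, parent_list, length):
--     """
--     Author: Chaitanya Vella (chaitanya-kumar.vella@broadcom.com)
--     :param list1:
--     :param list2:
--     :param length:
--     :return:
--     """
--     cnt = 0
--     for l in list_to_be_compared:
--         for x in parent_list:
--             if l.upper() == x.upper():
--                 cnt += 1
--     if cnt != length:
--         return False
--     return True
-- ===== SOURCE B (Python) =====
-- def compare_lists_by_count(list_to_be_compared, parent_list, length):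
--     c1 = {}
--     for l in list_to_be_compared:
--         k = l.upper()
--         c1[k] = c1.get(k, 0) + 1
--     c2 = {}
--     for x in parent_list:
--         k = x.upper()
--         c2[k] = c2.get(k, 0) + 1
--     cnt = sum(n1 * c2.get(k, 0) for k, n1 in c1.items())
--     return cnt == length
-- ===== Notes on version B (the rewrite author's own statement) =====
-- stated objective: faster
-- what changed: Replaces A's nested element-by-element scans with two frequency tables (uppercased keys of each list built once) and a single pass over the distinct keys of the first table summing products of paired counts, so neither list is scanned per element.
import Mathlib
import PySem

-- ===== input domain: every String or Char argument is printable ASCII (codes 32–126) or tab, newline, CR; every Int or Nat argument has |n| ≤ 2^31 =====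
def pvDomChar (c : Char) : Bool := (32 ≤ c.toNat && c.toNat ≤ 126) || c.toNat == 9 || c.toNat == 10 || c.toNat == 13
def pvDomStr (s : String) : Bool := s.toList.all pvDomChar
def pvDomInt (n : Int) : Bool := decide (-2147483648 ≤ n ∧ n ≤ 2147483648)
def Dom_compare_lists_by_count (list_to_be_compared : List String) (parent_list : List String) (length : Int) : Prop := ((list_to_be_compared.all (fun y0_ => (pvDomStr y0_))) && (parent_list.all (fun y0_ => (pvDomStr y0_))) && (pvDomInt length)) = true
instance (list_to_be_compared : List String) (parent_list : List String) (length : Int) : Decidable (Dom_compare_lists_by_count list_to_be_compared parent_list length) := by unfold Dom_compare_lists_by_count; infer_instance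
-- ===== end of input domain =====

-- B replaces A's nested per-element scans by two frequency tables of uppercased keys built
-- once, then a single pass over the distinct keys of the first table summing products of
-- paired counts (objective: faster, O(m+n+k) vs O(m*n)).


-- ===== PORT A =====
def compare_lists_by_count (list_to_be_compared : List String) (parent_list : List String) (length : Int) : Bool :=
  let cnt : Int := list_to_be_compared.foldl
    (fun cnt l => parent_list.foldl
      (fun cnt x => if PySem.Str.upper l == PySem.Str.upper x then cnt + 1 else cnt) cnt) 0
  if cnt ≠ length then false else true

-- ===== PORT B =====
def compare_lists_by_count_alt (list_to_be_compared : List String) (parent_list : List String) (length : Int) : Bool :=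
  let c1 : PySem.Dict String Int := list_to_be_compared.foldl
    (fun d l => d.insert (PySem.Str.upper l) (d.getD (PySem.Str.upper l) 0 + 1)) PySem.Dict.empty
  let c2 : PySem.Dict String Int := parent_list.foldl
    (fun d x => d.insert (PySem.Str.upper x) (d.getD (PySem.Str.upper x) 0 + 1)) PySem.Dict.empty
  let cnt : Int := (c1.items.map (fun p => p.2 * c2.getD p.1 0)).sum
  decide (cnt = length)

-- ===== PRECONDITION & SPEC =====
def Spec_compare_lists_by_count (list_to_be_compared : List String) (parent_list : List String) (length : Int) (out : Bool) : Prop := out = compare_lists_by_count_alt list_to_be_compared parent_list length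
instance (list_to_be_compared : List String) (parent_list : List String) (length : Int) (out : Bool) : Decidable (Spec_compare_lists_by_count list_to_be_compared parent_list length out) := by unfold Spec_compare_lists_by_count; infer_instance

-- ===== CLAIM (what is proved, stated in full; the proofs are below) =====
def Claim_equal_compare_lists_by_count : Prop := ∀ (list_to_be_compared : List String) (parent_list : List String) (length : Int), Dom_compare_lists_by_count list_to_be_compared parent_list length → Spec_compare_lists_by_count list_to_be_compared parent_list length (compare_lists_by_count list_to_be_compared parent_list length)

-- ===== LEMMAS AND PROOFS =====

-- B's dict-building loop over a list builds the counter of its uppercased image.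
lemma upper_fold_eq_counter (L : List String) :
    L.foldl (fun d l => d.insert (PySem.Str.upper l) (d.getD (PySem.Str.upper l) 0 + 1))
        (PySem.Dict.empty : PySem.Dict String Int)
      = PySem.Dict.counter (L.map PySem.Str.upper) := by
  rw [← PySem.Dict.foldl_insert_getD_add_one_eq_counter, List.foldl_map]

-- A's inner scan over parent_list adds the multiplicity of the uppercased element.
lemma inner_scan_eq_count (parent_list : List String) (l : String) (c : Int) :
    parent_list.foldl
        (fun cnt x => if PySem.Str.upper l == PySem.Str.upper x then cnt + 1 else cnt) c
      = c + ((parent_list.map PySem.Str.upper).count (PySem.Str.upper l) : Int) := by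
  rw [PySem.List.foldl_count_if (fun x => PySem.Str.upper l == PySem.Str.upper x)]
  congr 2
  rw [List.count, List.countP_map]
  exact List.countP_congr (fun x _ => by
    simp only [Function.comp_apply, beq_iff_eq]; exact eq_comm)

-- Grouping identity: summing f over a list equals summing count·f over its distinct elements.
lemma sum_dedup_count_mul (u : List String) (f : String → Int) :
    ((PySem.List.dedup u).map (fun k => (u.count k : Int) * f k)).sum = (u.map f).sum := by
  rw [Finset.sum_list_map_count u f,
    ← List.sum_toFinset (fun k => (u.count k : Int) * f k) (PySem.List.nodup_dedup u)]
  have htf : (PySem.List.dedup u).toFinset = u.toFinset := by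
    ext x; simp
  rw [htf]
  exact Finset.sum_congr rfl (fun x _ => by push_cast [nsmul_eq_mul]; ring)

-- ===== VERDICT (by name: the statement is the Claim_ definition above) =====
theorem compare_lists_by_count_spec : Claim_equal_compare_lists_by_count := by
  intro L1 L2 n hdom
  clear hdom
  unfold Spec_compare_lists_by_count compare_lists_by_count compare_lists_by_count_alt
  simp only [upper_fold_eq_counter, PySem.Dict.items_counter, PySem.Dict.getD_counter,
    List.map_map]
  have hA : L1.foldl
      (fun cnt l => L2.foldl
        (fun cnt x => if PySem.Str.upper l == PySem.Str.upper x then cnt + 1 else cnt) cnt)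
      (0 : Int)
    = ((L1.map PySem.Str.upper).map
        (fun k => ((L2.map PySem.Str.upper).count k : Int))).sum := by
    rw [List.map_map]
    induction L1 using List.reverseRecOn with
    | nil => rfl
    | append_singleton xs x ih =>
        rw [List.foldl_append, List.map_append, List.sum_append, ih, List.foldl_cons,
          List.foldl_nil, inner_scan_eq_count]
        simp
  have hB : ((PySem.Set.ofList (L1.map PySem.Str.upper)).map
        ((fun p : String × Int => p.2 * ((L2.map PySem.Str.upper).count p.1 : Int)) ∘
          fun k => (k, ((L1.map PySem.Str.upper).count k : Int)))).sum
    = ((L1.map PySem.Str.upper).map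
        (fun k => ((L2.map PySem.Str.upper).count k : Int))).sum := by
    rw [← PySem.List.dedup_eq_ofList]
    exact sum_dedup_count_mul (L1.map PySem.Str.upper)
      (fun k => ((L2.map PySem.Str.upper).count k : Int))
  rw [hA, ← hB]
  by_cases h : ((PySem.Set.ofList (L1.map PySem.Str.upper)).map
        ((fun p : String × Int => p.2 * ((L2.map PySem.Str.upper).count p.1 : Int)) ∘
          fun k => (k, ((L1.map PySem.Str.upper).count k : Int)))).sum = n <;> simp [h]
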